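-- pv_equiv track=rewrite | github.com/Beremi/MLP_growing | rank_mlp_double.py | build_train_sizes
-- ===== SOURCE A (Python) =====
-- from typing import List, Optional, Sequence
--
-- def build_train_sizes(
--     total_chain: int,
--     train_start: int,
--     window: int,
--     max_total_steps: Optional[int],
--     num_windows: Optional[int],
-- ) -> list[int]:
--     if train_start >= total_chain:
--         raise ValueError("train-start-step must be < chain length")
--     if window <= 0:
--         raise ValueError("window-size must be positive")
--     max_trainable = max(0, total_chain - train_start - window)
--     if max_trainable < window:
--         raise ValueError("Not enough space for train/validation windows")
--     limit = max_trainable if max_total_steps is None else min(max_trainable, int(max_total_steps))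
--     sizes: list[int] = []
--     current = window
--     while current <= limit:
--         train_end = train_start + current
--         val_end = train_end + window
--         if val_end > total_chain:
--             break
--         sizes.append(current)
--         if num_windows is not None and len(sizes) >= num_windows:
--             break
--         current += window
--     if not sizes:
--         raise ValueError("Training schedule is empty; adjust window/limits")
--     return sizes
-- ===== SOURCE B (Python) =====
-- def build_train_sizes(total_chain, train_start, window, max_total_steps, num_windows):
--     if train_start >= total_chain:
--         raise ValueError("train-start-step must be < chain length")
--     if window <= 0:
--         raise ValueError("window-size must be positive")
--     max_trainable = max(0, total_chain - train_start - window)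
--     if max_trainable < window:
--         raise ValueError("Not enough space for train/validation windows")
--     limit = max_trainable if max_total_steps is None else min(max_trainable, int(max_total_steps))
--     natural = limit // window
--     count = natural if num_windows is None else min(natural, max(num_windows, 1))
--     sizes = [window * i for i in range(1, count + 1)]
--     if not sizes:
--         raise ValueError("Training schedule is empty; adjust window/limits")
--     return sizes
-- ===== Notes on version B (the rewrite author's own statement) =====
-- stated objective: simpler
-- what changed: Replaces A's while-loop (which appends one window at a time and breaks on the num_windows cap) by a closed-form window count (limit // window, capped by min(natural, max(num_windows, 1))) and a single range comprehension; the loop's val_end break is dead code because limit <= max_trainable.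
import Mathlib
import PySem

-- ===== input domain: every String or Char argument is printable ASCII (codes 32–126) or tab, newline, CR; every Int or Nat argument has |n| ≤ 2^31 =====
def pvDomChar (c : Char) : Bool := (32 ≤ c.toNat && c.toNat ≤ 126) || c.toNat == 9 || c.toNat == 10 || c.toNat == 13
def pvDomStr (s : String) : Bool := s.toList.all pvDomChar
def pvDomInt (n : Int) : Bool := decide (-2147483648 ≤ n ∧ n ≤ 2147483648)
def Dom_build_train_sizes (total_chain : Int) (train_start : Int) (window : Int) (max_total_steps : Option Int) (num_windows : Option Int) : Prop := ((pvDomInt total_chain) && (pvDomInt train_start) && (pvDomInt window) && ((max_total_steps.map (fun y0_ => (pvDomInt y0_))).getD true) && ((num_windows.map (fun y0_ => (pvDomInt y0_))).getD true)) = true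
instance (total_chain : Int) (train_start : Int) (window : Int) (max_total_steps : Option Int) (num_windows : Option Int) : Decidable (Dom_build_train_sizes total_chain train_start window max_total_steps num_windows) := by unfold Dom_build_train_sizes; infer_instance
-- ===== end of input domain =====

-- B replaces A's while-loop by a closed-form count (limit // window, capped by num_windows) and a range comprehension; objective: simpler.


-- ===== PORT A =====
-- the while-loop of A; hw carries the positivity of window established by A's guard (termination only)
def buildLoopA (total_chain : Int) (train_start : Int) (window : Int) (limit : Int)
    (num_windows : Option Int) (hw : 0 < window) (current : Int) (sizes : List Int) : List Int :=
  if _h : current ≤ limit then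
    let train_end := train_start + current
    let val_end := train_end + window
    if val_end > total_chain then sizes
    else
      let sizes' := sizes ++ [current]
      if (match num_windows with | some k => ((sizes'.length : Int) ≥ k : Bool) | none => false) then sizes'
      else buildLoopA total_chain train_start window limit num_windows hw (current + window) sizes'
  else sizes
termination_by (limit + window - current).toNat
decreasing_by omega

def build_train_sizes (total_chain : Int) (train_start : Int) (window : Int) (max_total_steps : Option Int) (num_windows : Option Int) : List Int :=
  if train_start ≥ total_chain then []   -- A raises ValueError here
  else if hw : window ≤ 0 then []        -- A raises ValueError here
  else
    let max_trainable := max 0 (total_chain - train_start - window)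
    if max_trainable < window then []    -- A raises ValueError here
    else
      let limit := match max_total_steps with | none => max_trainable | some m => min max_trainable m
      let sizes := buildLoopA total_chain train_start window limit num_windows (by omega) window []
      if sizes = [] then [] else sizes   -- A raises ValueError when empty

-- ===== PORT B =====
-- B's window count: natural if num_windows is None else min(natural, max(num_windows, 1))
def pvCnt (limit window : Int) (num_windows : Option Int) : Int :=
  match num_windows with
  | none => PySem.Int.floordiv limit window
  | some k => min (PySem.Int.floordiv limit window) (max k 1)

def build_train_sizes_alt (total_chain : Int) (train_start : Int) (window : Int) (max_total_steps : Option Int) (num_windows : Option Int) : List Int :=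
  if train_start ≥ total_chain then []   -- B raises ValueError here
  else if window ≤ 0 then []             -- B raises ValueError here
  else
    let max_trainable := max 0 (total_chain - train_start - window)
    if max_trainable < window then []    -- B raises ValueError here
    else
      let limit := match max_total_steps with | none => max_trainable | some m => min max_trainable m
      let count := pvCnt limit window num_windows
      let sizes := (PySem.List.pyRange 1 (count + 1) 1).map (fun i => window * i)
      if sizes = [] then [] else sizes   -- B raises ValueError when empty

-- ===== PRECONDITION & SPEC =====
-- Pre_ excludes exactly the four inputs classes on which A (and B alike) raises ValueError:
-- train_start ≥ total_chain, window ≤ 0, not enough room for train+validation windows, and a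
-- max_total_steps cap below one window (empty schedule).
def Pre_build_train_sizes (total_chain : Int) (train_start : Int) (window : Int) (max_total_steps : Option Int) (num_windows : Option Int) : Prop :=
  train_start < total_chain ∧ 0 < window ∧ window ≤ total_chain - train_start - window ∧
  window ≤ (match max_total_steps with | none => total_chain - train_start - window | some m => min (total_chain - train_start - window) m)
instance (total_chain : Int) (train_start : Int) (window : Int) (max_total_steps : Option Int) (num_windows : Option Int) : Decidable (Pre_build_train_sizes total_chain train_start window max_total_steps num_windows) := by unfold Pre_build_train_sizes; infer_instance
def pvWitness_build_train_sizes : Int × Int × Int × Option Int × Option Int := (20, 0, 3, some 10, some 2)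

def Spec_build_train_sizes (total_chain : Int) (train_start : Int) (window : Int) (max_total_steps : Option Int) (num_windows : Option Int) (out : List Int) : Prop := out = build_train_sizes_alt total_chain train_start window max_total_steps num_windows
instance (total_chain : Int) (train_start : Int) (window : Int) (max_total_steps : Option Int) (num_windows : Option Int) (out : List Int) : Decidable (Spec_build_train_sizes total_chain train_start window max_total_steps num_windows out) := by unfold Spec_build_train_sizes; infer_instance

-- ===== CLAIM (what is proved, stated in full; the proofs are below) =====
def Claim_equal_build_train_sizes : Prop := ∀ (total_chain : Int) (train_start : Int) (window : Int) (max_total_steps : Option Int) (num_windows : Option Int), Dom_build_train_sizes total_chain train_start window max_total_steps num_windows → Pre_build_train_sizes total_chain train_start window max_total_steps num_windows → Spec_build_train_sizes total_chain train_start window max_total_steps num_windows (build_train_sizes total_chain train_start window max_total_steps num_windows)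

-- ===== LEMMAS AND PROOFS =====

-- Loop invariant: at current = window * j with j-1 elements collected and the num_windows
-- stop not yet reached, the loop appends window*j, …, window*(pvCnt limit window num_windows).
lemma buildLoopA_eq (total_chain train_start window limit : Int) (num_windows : Option Int)
    (hw : 0 < window) (hlim : limit ≤ total_chain - train_start - window)
    (n : Nat) :
    ∀ (j : Int) (sizes : List Int),
      (PySem.Int.floordiv limit window + 1 - j).toNat ≤ n →
      1 ≤ j → (sizes.length : Int) = j - 1 →
      (∀ k, num_windows = some k → j - 1 < max k 1) →
      buildLoopA total_chain train_start window limit num_windows hw (window * j) sizes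
        = sizes ++ (PySem.List.pyRange j (pvCnt limit window num_windows + 1) 1).map
            (fun i => window * i) := by
  induction n with
  | zero =>
    intro j sizes hn hj hlen hstop
    have hjN : ¬ j ≤ PySem.Int.floordiv limit window := by omega
    have hcur : ¬ (window * j ≤ limit) := fun h =>
      hjN ((PySem.Int.le_floordiv_iff_mul_le (a := limit) (b := window) hw).2
        (by rw [mul_comm] at h; exact h))
    rw [buildLoopA, dif_neg hcur]
    have hcle : pvCnt limit window num_windows ≤ PySem.Int.floordiv limit window := by
      cases num_windows <;> simp [pvCnt]
    rw [PySem.List.pyRange_one_eq_nil (by omega)]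
    simp
  | succ n ih =>
    intro j sizes hn hj hlen hstop
    by_cases hjN : j ≤ PySem.Int.floordiv limit window
    case neg =>
      have hcur : ¬ (window * j ≤ limit) := fun h =>
        hjN ((PySem.Int.le_floordiv_iff_mul_le (a := limit) (b := window) hw).2
          (by rw [mul_comm] at h; exact h))
      rw [buildLoopA, dif_neg hcur]
      have hcle : pvCnt limit window num_windows ≤ PySem.Int.floordiv limit window := by
        cases num_windows <;> simp [pvCnt]
      rw [PySem.List.pyRange_one_eq_nil (by omega)]
      simp
    case pos =>
      have hcur : window * j ≤ limit := by
        have := (PySem.Int.le_floordiv_iff_mul_le (a := limit) (b := window) hw).1 hjN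
        rw [mul_comm] at this; exact this
      have hval : ¬ (train_start + window * j + window > total_chain) := by omega
      rw [buildLoopA, dif_pos hcur]
      simp only [if_neg hval]
      have hlen2 : (((sizes ++ [window * j]).length : Int)) = (j + 1) - 1 := by
        simp; omega
      have hstep : window * j + window = window * (j + 1) := by ring
      cases num_windows with
      | none =>
        rw [if_neg (by simp)]
        rw [hstep, ih (j + 1) (sizes ++ [window * j]) (by omega) (by omega)
          hlen2 (by intro k hk; cases hk)]
        rw [show pvCnt limit window none = PySem.Int.floordiv limit window from rfl,
          PySem.List.pyRange_one_cons (a := j) (by omega)]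
        simp only [List.map_cons, List.append_assoc, List.cons_append, List.nil_append]
      | some k =>
        have hk1 := hstop k rfl
        have hcnt : pvCnt limit window (some k)
            = min (PySem.Int.floordiv limit window) (max k 1) := rfl
        by_cases hge : (j : Int) ≥ k
        · rw [if_pos (by simp only [decide_eq_true_iff]; omega)]
          have hminj : min (PySem.Int.floordiv limit window) (max k 1) = j := by omega
          rw [hcnt, hminj]
          rw [PySem.List.pyRange_one_cons (by omega), PySem.List.pyRange_one_eq_nil (by omega)]
          simp
        · rw [if_neg (by simp only [decide_eq_true_iff]; omega)]
          rw [hstep, ih (j + 1) (sizes ++ [window * j]) (by omega) (by omega)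
            hlen2 (by intro k' hk'; injection hk' with h; omega)]
          rw [hcnt, PySem.List.pyRange_one_cons (a := j) (by omega)]
          simp only [List.map_cons, List.append_assoc, List.cons_append, List.nil_append]

-- ===== VERDICT (by name: the statement is the Claim_ definition above) =====
theorem build_train_sizes_spec : Claim_equal_build_train_sizes := by
  intro total_chain train_start window max_total_steps num_windows _hdom hpre
  obtain ⟨h1, h2, h3, h4⟩ := hpre
  unfold Spec_build_train_sizes build_train_sizes build_train_sizes_alt
  have hmt : max 0 (total_chain - train_start - window) = total_chain - train_start - window := by
    omega
  obtain ⟨limit, hL⟩ : ∃ L, (match max_total_steps with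
      | none => total_chain - train_start - window
      | some m => min (total_chain - train_start - window) m) = L := ⟨_, rfl⟩
  rw [hL] at h4
  have hlim : limit ≤ total_chain - train_start - window := by
    rcases max_total_steps with _ | m <;> simp only [] at hL <;> omega
  rw [if_neg (by omega : ¬ train_start ≥ total_chain), dif_neg (by omega : ¬ window ≤ 0),
    if_neg (by omega : ¬ window ≤ 0)]
  simp only [hmt, hL]
  rw [if_neg (by omega : ¬ total_chain - train_start - window < window)]
  have hN1 : 1 ≤ PySem.Int.floordiv limit window :=
    (PySem.Int.le_floordiv_iff_mul_le (a := limit) (b := window) h2).2 (by omega)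
  have hloop := buildLoopA_eq total_chain train_start window limit num_windows h2 hlim
    (PySem.Int.floordiv limit window + 1 - 1).toNat 1 [] (le_refl _) (by omega) (by simp)
    (by intro k _; omega)
  rw [show window * 1 = window by ring] at hloop
  rw [hloop]
  have hcnt1 : 1 ≤ pvCnt limit window num_windows := by
    rcases num_windows with _ | k <;> simp only [pvCnt] <;> omega
  have hne : ((PySem.List.pyRange 1 (pvCnt limit window num_windows + 1) 1).map
      (fun i => window * i)) ≠ [] := by
    rw [PySem.List.pyRange_one_cons (by omega)]; simp
  simp only [List.nil_append]
  rw [if_neg hne, if_neg (by omega : ¬ train_start ≥ total_chain),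
    if_neg (by omega : ¬ total_chain - train_start - window < window)]
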